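-- pv_equiv track=rewrite | github.com/Soumyasreehalder/Chatbot2.0 | app8.py | looks_like_general_question
-- ===== SOURCE A (Python) =====
-- def looks_like_general_question(q: str) -> bool:
--     ql = (q or "").lower()
--     special = [
--         "root causes","show root causes","list root causes","show causes",
--         "check logs","analyze logs","show resolution","resolution","fix","how to fix",
--         "prior incident","previous incident","related incident","similar incidents",
--         "last deploy","latest version","deployment status","what version","version deployed",
--         "what dns is blocking","dns is blocking","why dns failing"
--     ]
--     return not any(p in ql for p in special)
-- ===== SOURCE B (Python) =====
-- def looks_like_general_question(q: str) -> bool: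
--     phrases = (
--         "root causes","show root causes","list root causes","show causes",
--         "check logs","analyze logs","show resolution","resolution","fix","how to fix",
--         "prior incident","previous incident","related incident","similar incidents",
--         "last deploy","latest version","deployment status","what version","version deployed",
--         "what dns is blocking","dns is blocking","why dns failing"
--     )
--     ql = (q or "").lower()
--     for i in range(len(ql) + 1):
--         if ql.startswith(phrases, i):
--             return False
--     return True
-- ===== Notes on version B (the rewrite author's own statement) =====
-- stated objective: alternative
-- what changed: Replaced the phrase-major loop of independent `p in ql` substring scans with one position-major pass over the query that tests all phrases at each offset via a single startswith(tuple, i) call.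
import Mathlib
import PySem

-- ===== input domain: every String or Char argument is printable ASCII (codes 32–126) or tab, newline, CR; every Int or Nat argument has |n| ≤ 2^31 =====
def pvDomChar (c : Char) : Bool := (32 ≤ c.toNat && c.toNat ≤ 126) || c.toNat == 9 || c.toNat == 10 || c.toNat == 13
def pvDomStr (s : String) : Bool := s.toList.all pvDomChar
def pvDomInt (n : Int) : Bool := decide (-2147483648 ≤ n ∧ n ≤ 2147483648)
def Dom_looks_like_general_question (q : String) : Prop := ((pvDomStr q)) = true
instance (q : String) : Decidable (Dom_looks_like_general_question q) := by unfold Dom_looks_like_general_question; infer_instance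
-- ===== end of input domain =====

-- B replaces A's phrase-major loop of `in` substring scans by a single position-major
-- scan that tests all phrases at each offset with startswith (objective: alternative).

-- ===== PORT A =====
def pvSpecial : List String := [
  "root causes","show root causes","list root causes","show causes",
  "check logs","analyze logs","show resolution","resolution","fix","how to fix",
  "prior incident","previous incident","related incident","similar incidents",
  "last deploy","latest version","deployment status","what version","version deployed",
  "what dns is blocking","dns is blocking","why dns failing"]

def looks_like_general_question (q : String) : Bool :=
  -- ql = (q or "").lower(): an empty string is falsy, so `q or ""` is q when nonempty else ""
  let ql := PySem.Str.lower (if q.toList = [] then "" else q)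
  !(pvSpecial.any (fun p => PySem.Str.isIn p ql))

-- ===== PORT B =====
-- the loop `for i in range(len(ql)+1): if ql.startswith(phrases, i): return False`,
-- as structural recursion over the suffixes of ql
def pvScan (phrases : List (List Char)) : List Char → Bool
  | [] => !(phrases.any (fun p => p.isPrefixOf ([] : List Char)))
  | c :: rest =>
      if phrases.any (fun p => p.isPrefixOf (c :: rest)) then false
      else pvScan phrases rest

def looks_like_general_question_alt (q : String) : Bool :=
  let ql := PySem.Str.lower (if q.toList = [] then "" else q)
  pvScan (pvSpecial.map String.toList) ql.toList

-- ===== PRECONDITION & SPEC =====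
def Spec_looks_like_general_question (q : String) (out : Bool) : Prop := out = looks_like_general_question_alt q
instance (q : String) (out : Bool) : Decidable (Spec_looks_like_general_question q out) := by unfold Spec_looks_like_general_question; infer_instance

-- ===== CLAIM (what is proved, stated in full; the proofs are below) =====
def Claim_equal_looks_like_general_question : Prop := ∀ (q : String), Dom_looks_like_general_question q → Spec_looks_like_general_question q (looks_like_general_question q)

-- ===== LEMMAS AND PROOFS =====

-- `sub in s` tested on a cons splits into "match here" or "match in the tail"
lemma pvIsIn_cons (p : List Char) (c : Char) (rest : List Char) :
    PySem.Chars.isIn p (c :: rest) = (p.isPrefixOf (c :: rest) || PySem.Chars.isIn p rest) := by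
  rw [Bool.eq_iff_iff]
  simp [PySem.Chars.isIn_iff_infix, List.infix_cons_iff]

lemma pvScan_eq (ps : List (List Char)) (L : List Char) :
    pvScan ps L = !(ps.any (fun p => PySem.Chars.isIn p L)) := by
  induction L with
  | nil =>
      simp only [pvScan]
      congr 1
      rw [Bool.eq_iff_iff]
      simp [List.any_eq_true, PySem.Chars.isIn_iff_infix]
  | cons c rest ih =>
      simp only [pvScan, ih]
      cases h : ps.any (fun p => p.isPrefixOf (c :: rest)) with
      | false =>
          rw [if_neg (by simp), Bool.eq_iff_iff]
          simp_all [pvIsIn_cons]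
      | true =>
          rw [if_pos rfl, eq_comm, Bool.not_eq_false', List.any_eq_true]
          obtain ⟨p, hp, hpre⟩ := List.any_eq_true.mp h
          exact ⟨p, hp, by rw [pvIsIn_cons, hpre, Bool.true_or]⟩

-- ===== VERDICT (by name: the statement is the Claim_ definition above) =====
theorem looks_like_general_question_spec : Claim_equal_looks_like_general_question := by
  intro q _
  unfold Spec_looks_like_general_question looks_like_general_question looks_like_general_question_alt
  simp only [pvScan_eq, List.any_map, Function.comp_def, PySem.Str.isIn]
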